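-- pv_equiv track=rewrite | github.com/Aasthaengg/IBMdataset | Python_codes/p03032/s517626416.py | solve
-- ===== SOURCE A (Python) =====
-- def solve(N, K, V):
--     ans = 0
--     for k in range(min(K, N) + 1):
--         for l in range(0, k+1):
--             s = sorted(V[:l] + V[N-k+l:])
--             v = sum(s)
--             ans = max(ans, v)
--             if k < K:
--                 # 最大(min(K-k, k))回、キューに戻すことが可能
--                 # 負の数は戻せるだけ戻せばよい
--                 for m in range(min(K-k, k)):
--                     if s[m] < 0:
--                         v -= s[m]
--                 ans = max(ans, v)
--
--     return ans
-- ===== SOURCE B (Python) =====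
-- def _merge(a, b):
--     out = []
--     i = j = 0
--     while i < len(a) and j < len(b):
--         if a[i] <= b[j]:
--             out.append(a[i])
--             i += 1
--         else:
--             out.append(b[j])
--             j += 1
--     out.extend(a[i:])
--     out.extend(b[j:])
--     return out
--
--
-- def solve(N, K, V):
--     M = min(K, N)
--     rights = [V[N - r:] for r in range(M + 1)]
--     rnegs = [sorted([x for x in t if x < 0]) for t in rights]
--     rsums = [sum(t) for t in rights]
--     ans = 0
--     for l in range(M + 1):
--         left = V[:l]
--         lneg = sorted([x for x in left if x < 0])
--         ls = sum(left)
--         for r in range(M + 1 - l):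
--             m = min(K - l - r, l + r)
--             ans = max(ans, ls + rsums[r] - sum(_merge(lneg, rnegs[r])[:m]))
--     return ans
-- ===== Notes on version B (the rewrite author's own statement) =====
-- stated objective: alternative
-- what changed: B replaces A's per-pair full sort with a different decomposition: it reindexes the loops over (left-count l, right-count r) so the right slice depends on r alone, precomputes each right slice's sum and sorted negative list once in tables, sorts each left prefix's negatives once per l, and per pair only linearly merges the two pre-sorted negative lists and subtracts the prefix of the m smallest.
import Mathlib
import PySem

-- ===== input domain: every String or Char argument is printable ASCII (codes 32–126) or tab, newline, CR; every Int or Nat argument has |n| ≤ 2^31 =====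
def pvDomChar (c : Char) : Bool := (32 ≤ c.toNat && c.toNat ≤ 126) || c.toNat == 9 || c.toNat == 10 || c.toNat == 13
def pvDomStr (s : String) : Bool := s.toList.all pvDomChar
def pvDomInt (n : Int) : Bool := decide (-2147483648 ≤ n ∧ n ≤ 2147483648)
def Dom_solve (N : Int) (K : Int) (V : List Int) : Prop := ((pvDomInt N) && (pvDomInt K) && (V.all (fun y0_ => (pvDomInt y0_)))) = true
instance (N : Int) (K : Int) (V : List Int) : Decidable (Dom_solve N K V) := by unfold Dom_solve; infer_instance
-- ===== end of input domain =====

-- B reindexes the loops over (left-count, right-count), precomputes each right slice's sum and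
-- sorted negative list once in tables, sorts each left prefix's negatives once, and per pair only
-- merges the two pre-sorted negative lists linearly — no per-pair sort (objective: alternative).

-- ===== PORT A =====
def solve (N : Int) (K : Int) (V : List Int) : Int :=
  (PySem.List.pyRange 0 (min K N + 1) 1).foldl (fun ans k =>
    (PySem.List.pyRange 0 (k + 1) 1).foldl (fun ans l =>
      let s := PySem.List.sorted
        (PySem.List.slice V none (some l) ++ PySem.List.slice V (some (N - k + l)) none)
        (fun x => x) false
      let v := s.sum
      let ans := max ans v
      if k < K then
        -- s[m] raises IndexError out of range; total form pyGetD is exact under Pre_solve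
        max ans ((PySem.List.pyRange 0 (min (K - k) k) 1).foldl (fun v m =>
          if PySem.List.pyGetD s m 0 < 0 then v - PySem.List.pyGetD s m 0 else v) v)
      else ans) ans) 0

-- ===== PORT B =====
-- hand-written linear merge of two lists (Source B's _merge while-loop, as structural recursion)
def mergeB : List Int → List Int → List Int
  | [], b => b
  | a, [] => a
  | x :: xs, y :: ys =>
      if x ≤ y then x :: mergeB xs (y :: ys) else y :: mergeB (x :: xs) ys

def solve_alt (N : Int) (K : Int) (V : List Int) : Int :=
  let M := min K N
  let rights := (PySem.List.pyRange 0 (M + 1) 1).map (fun r => PySem.List.slice V (some (N - r)) none)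
  let rnegs := rights.map (fun t => PySem.List.sorted (t.filter (fun x => decide (x < 0))) (fun x => x) false)
  let rsums := rights.map (fun t => t.sum)
  (PySem.List.pyRange 0 (M + 1) 1).foldl (fun ans l =>
    let left := PySem.List.slice V none (some l)
    let lneg := PySem.List.sorted (left.filter (fun x => decide (x < 0))) (fun x => x) false
    let ls := left.sum
    (PySem.List.pyRange 0 (M + 1 - l) 1).foldl (fun ans r =>
      let m := min (K - l - r) (l + r)
      -- rsums[r] / rnegs[r]: r is always in range, pyGetD is exact here
      max ans (ls + PySem.List.pyGetD rsums r 0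
        - (PySem.List.slice (mergeB lneg (PySem.List.pyGetD rnegs r [])) none (some m)).sum)) ans) 0

-- ===== PRECONDITION & SPEC =====
-- Pre_ excludes exactly the inputs on which A raises IndexError: those where, for some loop
-- position (k, l) with k < K, the taken list V[:l] + V[N-k+l:] is shorter than min(K-k, k),
-- so A's inner scan s[m] runs past the end (possible only when N > len(V)).
def Pre_solve (N : Int) (K : Int) (V : List Int) : Prop :=
  ∀ k ∈ PySem.List.pyRange 0 (min K N + 1) 1, k < K →
    ∀ l ∈ PySem.List.pyRange 0 (k + 1) 1,
      min (K - k) k ≤ ((PySem.List.slice V none (some l)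
        ++ PySem.List.slice V (some (N - k + l)) none).length : Int)
instance (N : Int) (K : Int) (V : List Int) : Decidable (Pre_solve N K V) := by unfold Pre_solve; infer_instance
def pvWitness_solve : Int × Int × List Int := (3, 2, [-1, 2, 3])
def Spec_solve (N : Int) (K : Int) (V : List Int) (out : Int) : Prop := out = solve_alt N K V
instance (N : Int) (K : Int) (V : List Int) (out : Int) : Decidable (Spec_solve N K V out) := by unfold Spec_solve; infer_instance

-- ===== CLAIM (what is proved, stated in full; the proofs are below) =====
def Claim_equal_solve : Prop := ∀ (N : Int) (K : Int) (V : List Int), Dom_solve N K V → Pre_solve N K V → Spec_solve N K V (solve N K V)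

-- ===== LEMMAS AND PROOFS =====

-- the canonical per-pair candidate both programs compute, indexed by (left count l, right count r)
def cand (N K : Int) (V : List Int) (l r : Int) : Int :=
  let t := PySem.List.slice V none (some l) ++ PySem.List.slice V (some (N - r)) none
  t.sum - ((PySem.List.sorted (t.filter (fun x => decide (x < 0))) (fun x => x) false).take
    (min (K - (l + r)) (l + r)).toNat).sum

-- sum of a list of nonpositive integers is nonpositive
lemma sum_nonpos_of (l : List Int) (h : ∀ x ∈ l, x ≤ 0) : l.sum ≤ 0 := by
  induction l with
  | nil => simp
  | cons a t ih =>
    simp only [List.sum_cons]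
    have := h a (by simp)
    have ht := ih (fun x hx => h x (by simp [hx]))
    omega

-- A's inner subtract-loop over the first n sorted positions subtracts exactly the negatives among them.
lemma foldl_sub_neg (s : List Int) (n : Nat) (h : n ≤ s.length) (v : Int) :
    (PySem.List.pyRange 0 (n : Int) 1).foldl (fun v m =>
        if PySem.List.pyGetD s m 0 < 0 then v - PySem.List.pyGetD s m 0 else v) v
      = v - ((s.take n).filter (fun x => decide (x < 0))).sum := by
  induction n generalizing v with
  | zero => simp
  | succ n ih =>
    have hn : n < s.length := h
    have hcast : ((n + 1 : Nat) : Int) = (n : Int) + 1 := by push_cast; ring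
    rw [hcast, PySem.List.pyRange_one_succ_right (by positivity), List.foldl_append,
      ih (by omega)]
    have hget : PySem.List.pyGetD s (n : Int) 0 = s[n] := by
      simp [PySem.List.pyGetD_natCast, List.getD_eq_getElem?_getD, hn]
    have htake : s.take (n + 1) = s.take n ++ [s[n]] := by
      rw [List.take_add_one]; simp [hn]
    simp only [List.foldl_cons, List.foldl_nil, hget, htake, List.filter_append,
      List.sum_append]
    by_cases hneg : s[n] < 0 <;> simp [hneg] <;> ring

-- on a ≤-sorted list, taking then filtering negatives = filtering then taking
lemma filter_take_of_pairwise (s : List Int) (h : s.Pairwise (· ≤ ·)) (m : Nat) :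
    (s.take m).filter (fun x => decide (x < 0)) = (s.filter (fun x => decide (x < 0))).take m := by
  induction s generalizing m with
  | nil => simp
  | cons a tl ih =>
    rcases List.pairwise_cons.mp h with ⟨ha, htl⟩
    cases m with
    | zero => simp
    | succ m =>
      by_cases hneg : a < 0
      · simp [List.take_succ_cons, hneg, ih htl]
      · have h1 : tl.filter (fun x => decide (x < 0)) = [] := by
          rw [List.filter_eq_nil_iff]; intro x hx
          simp only [decide_eq_true_eq]; have := ha x hx; omega
        have h2 : (tl.take m).filter (fun x => decide (x < 0)) = [] := by
          rw [List.filter_eq_nil_iff]; intro x hx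
          have := ha x (List.mem_of_mem_take hx)
          simp only [decide_eq_true_eq]; omega
        simp [List.take_succ_cons, hneg, h1, h2]

-- the negatives of sorted(t) are sorted(negatives of t)
lemma filter_sorted_eq (t : List Int) :
    (PySem.List.sorted t (fun x => x) false).filter (fun x => decide (x < 0))
      = PySem.List.sorted (t.filter (fun x => decide (x < 0))) (fun x => x) false := by
  exact (PySem.List.sorted_id_eq_of_perm_of_pairwise _ _
    ((PySem.List.sorted_perm t (fun x => x) false).filter _)
    ((PySem.List.sorted_pairwise t (fun x => x)).filter _)).symm

-- mergeB is a permutation of the concatenation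
lemma mergeB_perm (a b : List Int) : (mergeB a b).Perm (a ++ b) := by
  fun_induction mergeB a b with
  | case1 b => simp
  | case2 a h => simp
  | case3 x xs y ys hle ih =>
    simpa [mergeB, hle] using ih.cons x
  | case4 x xs y ys hle ih =>
    refine (List.Perm.cons y ih).trans ?_
    exact (List.perm_middle).symm

-- merging two ≤-sorted lists gives a ≤-sorted list
lemma mergeB_pairwise (a b : List Int) (ha : a.Pairwise (· ≤ ·)) (hb : b.Pairwise (· ≤ ·)) :
    (mergeB a b).Pairwise (· ≤ ·) := by
  fun_induction mergeB a b with
  | case1 b => exact hb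
  | case2 a h => exact ha
  | case3 x xs y ys hle ih =>
    rcases List.pairwise_cons.mp ha with ⟨hx, hxs⟩
    refine List.pairwise_cons.mpr ⟨?_, ih hxs hb⟩
    intro z hz
    have hz' : z ∈ xs ++ (y :: ys) := (mergeB_perm xs (y :: ys)).mem_iff.mp hz
    rcases List.mem_append.mp hz' with h1 | h2
    · exact hx z h1
    · rcases List.mem_cons.mp h2 with rfl | h3
      · exact hle
      · have := (List.pairwise_cons.mp hb).1 z h3
        omega
  | case4 x xs y ys hle ih =>
    rcases List.pairwise_cons.mp hb with ⟨hy, hys⟩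
    refine List.pairwise_cons.mpr ⟨?_, ih ha hys⟩
    intro z hz
    have hz' : z ∈ (x :: xs) ++ ys := (mergeB_perm (x :: xs) ys).mem_iff.mp hz
    rcases List.mem_append.mp hz' with h1 | h2
    · rcases List.mem_cons.mp h1 with rfl | h3
      · omega
      · have := (List.pairwise_cons.mp ha).1 z h3
        omega
    · exact hy z h2

-- merging the sorted negatives of the two sides = the sorted negatives of the taken list
lemma mergeB_sorted_filter (L R : List Int) :
    mergeB (PySem.List.sorted (L.filter (fun x => decide (x < 0))) (fun x => x) false)
           (PySem.List.sorted (R.filter (fun x => decide (x < 0))) (fun x => x) false)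
      = PySem.List.sorted ((L ++ R).filter (fun x => decide (x < 0))) (fun x => x) false := by
  refine (PySem.List.sorted_id_eq_of_perm_of_pairwise _ _ ?_ ?_).symm
  · refine (mergeB_perm _ _).trans ?_
    rw [List.filter_append]
    exact (PySem.List.sorted_perm _ (fun x => x) false).append
      (PySem.List.sorted_perm _ (fun x => x) false)
  · exact mergeB_pairwise _ _ (PySem.List.sorted_pairwise _ (fun x => x))
      (PySem.List.sorted_pairwise _ (fun x => x))

-- A's per-(k,l) body is a single max-update with the canonical candidate at (l, k-l)
lemma body_eq_A (N K : Int) (V : List Int) (k l ans : Int)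
    (hk0 : 0 ≤ k) (hkK : k ≤ K) (hl0 : 0 ≤ l) (hlk : l ≤ k)
    (hr : k < K → min (K - k) k ≤ ((PySem.List.slice V none (some l)
      ++ PySem.List.slice V (some (N - k + l)) none).length : Int)) :
    (let s := PySem.List.sorted
        (PySem.List.slice V none (some l) ++ PySem.List.slice V (some (N - k + l)) none)
        (fun x => x) false
      let v := s.sum
      let ans := max ans v
      if k < K then
        max ans ((PySem.List.pyRange 0 (min (K - k) k) 1).foldl (fun v m =>
          if PySem.List.pyGetD s m 0 < 0 then v - PySem.List.pyGetD s m 0 else v) v)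
      else ans)
    = max ans (cand N K V l (k - l)) := by
  have hstart : N - k + l = N - (k - l) := by ring
  set r : Int := k - l with hrdef
  set t := PySem.List.slice V none (some l) ++ PySem.List.slice V (some (N - r)) none with ht
  set s := PySem.List.sorted t (fun x => x) false with hs
  have hsum : s.sum = t.sum := (PySem.List.sorted_perm t (fun x => x) false).sum_eq
  have hslen : (s.length : Int) = (t.length : Int) := by rw [hs, PySem.List.length_sorted]
  have hlr : l + r = k := by omega
  set m : Int := min (K - k) k with hmdef
  have hm0 : 0 ≤ m := by omega
  have hcast : (m.toNat : Int) = m := Int.toNat_of_nonneg hm0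
  have hnegs : (s.take m.toNat).filter (fun x => decide (x < 0))
      = (PySem.List.sorted (t.filter (fun x => decide (x < 0))) (fun x => x) false).take m.toNat := by
    rw [filter_take_of_pairwise s (PySem.List.sorted_pairwise t (fun x => x)) m.toNat,
      filter_sorted_eq]
  have hcand : cand N K V l r = t.sum
      - ((PySem.List.sorted (t.filter (fun x => decide (x < 0))) (fun x => x) false).take m.toNat).sum := by
    simp only [cand, hlr, ← ht, ← hmdef]
  have hnonpos : ((PySem.List.sorted (t.filter (fun x => decide (x < 0))) (fun x => x) false).take m.toNat).sum ≤ 0 := by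
    apply sum_nonpos_of
    intro x hx
    have hmem : x ∈ t.filter (fun x => decide (x < 0)) := by
      have := List.mem_of_mem_take hx
      rwa [PySem.List.mem_sorted] at this
    have := List.of_mem_filter hmem
    simp only [decide_eq_true_eq] at this
    omega
  rw [hstart, ← ht, ← hs]
  by_cases hkK' : k < K
  · have hfold : ∀ v : Int, (PySem.List.pyRange 0 m 1).foldl (fun v m' =>
        if PySem.List.pyGetD s m' 0 < 0 then v - PySem.List.pyGetD s m' 0 else v) v
      = v - ((s.take m.toNat).filter (fun x => decide (x < 0))).sum := by
      intro v
      have hrlen : m.toNat ≤ s.length := by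
        have := hr hkK'; rw [hstart, ← ht] at this; omega
      rw [← hcast]
      exact foldl_sub_neg s m.toNat hrlen v
    simp only [if_pos hkK', hfold, hsum, hnegs, hcand]
    omega
  · have hm_eq : m = 0 := by omega
    simp only [if_neg hkK', hsum, hcand, hm_eq]
    simp

-- B's per-(l,r) body is a single max-update with the canonical candidate at (l, r)
lemma body_eq_B (N K : Int) (V : List Int) (M l r ans : Int)
    (hM : M = min K N) (hl0 : 0 ≤ l) (hr0 : 0 ≤ r) (hlr : l + r ≤ M) :
    (let m := min (K - l - r) (l + r)
     max ans (PySem.List.slice V none (some l) |>.sum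
       |> (fun ls => ls + PySem.List.pyGetD ((PySem.List.pyRange 0 (M + 1) 1).map
             (fun r => (PySem.List.slice V (some (N - r)) none).sum)) r 0
        - (PySem.List.slice (mergeB
            (PySem.List.sorted ((PySem.List.slice V none (some l)).filter (fun x => decide (x < 0))) (fun x => x) false)
            (PySem.List.pyGetD ((PySem.List.pyRange 0 (M + 1) 1).map
              (fun r => PySem.List.sorted ((PySem.List.slice V (some (N - r)) none).filter (fun x => decide (x < 0))) (fun x => x) false)) r []))
            none (some m)).sum)))
    = max ans (cand N K V l r) := by
  have hrlt : r < M + 1 := by omega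
  have hm0 : (0 : Int) ≤ min (K - l - r) (l + r) := by omega
  rw [PySem.List.pyGetD_map_pyRange_of_nonneg _ (M + 1) r _ hr0 hrlt,
      PySem.List.pyGetD_map_pyRange_of_nonneg _ (M + 1) r _ hr0 hrlt]
  have hmerge := mergeB_sorted_filter (PySem.List.slice V none (some l))
    (PySem.List.slice V (some (N - r)) none)
  simp only [hmerge, PySem.List.slice_to _ hm0, cand, List.sum_append]
  have hmm : min (K - (l + r)) (l + r) = min (K - l - r) (l + r) := by omega
  rw [hmm]

-- the pair list each side enumerates
def pairsA (M : Int) : List (Int × Int) :=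
  (PySem.List.pyRange 0 (M + 1) 1).flatMap (fun k =>
    (PySem.List.pyRange 0 (k + 1) 1).map (fun l => (l, k - l)))
def pairsB (M : Int) : List (Int × Int) :=
  (PySem.List.pyRange 0 (M + 1) 1).flatMap (fun l =>
    (PySem.List.pyRange 0 (M + 1 - l) 1).map (fun r => (l, r)))

lemma mem_pairsA (M : Int) (p : Int × Int) :
    p ∈ pairsA M ↔ 0 ≤ p.1 ∧ 0 ≤ p.2 ∧ p.1 + p.2 ≤ M := by
  obtain ⟨a, b⟩ := p
  simp only [pairsA, List.mem_flatMap, List.mem_map, PySem.List.mem_pyRange_one, Prod.mk.injEq]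
  constructor
  · rintro ⟨k, hk, l, hl, rfl, rfl⟩; omega
  · rintro ⟨h1, h2, h3⟩
    exact ⟨a + b, by omega, a, by omega, rfl, by omega⟩

lemma mem_pairsB (M : Int) (p : Int × Int) :
    p ∈ pairsB M ↔ 0 ≤ p.1 ∧ 0 ≤ p.2 ∧ p.1 + p.2 ≤ M := by
  obtain ⟨a, b⟩ := p
  simp only [pairsB, List.mem_flatMap, List.mem_map, PySem.List.mem_pyRange_one, Prod.mk.injEq]
  constructor
  · rintro ⟨l, hl, r, hr, rfl, rfl⟩; omega
  · rintro ⟨h1, h2, h3⟩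
    exact ⟨a, by omega, b, by omega, rfl, rfl⟩

lemma nodup_pairsA (M : Int) : (pairsA M).Nodup := by
  rw [pairsA, List.nodup_flatMap]
  constructor
  · intro k hk
    exact (PySem.List.nodup_pyRange_one 0 (k + 1)).map
      (fun a b h => by simpa using congrArg Prod.fst h)
  · have := PySem.List.pairwise_lt_pyRange_one 0 (M + 1)
    refine this.imp ?_
    intro a b hab
    intro p hpa hpb
    simp only [List.mem_map] at hpa hpb
    rcases hpa with ⟨l1, _, rfl⟩
    rcases hpb with ⟨l2, h2, heq⟩
    have e1 : l2 = l1 := by simpa using congrArg Prod.fst heq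
    have e2 : b - l2 = a - l1 := by simpa using congrArg Prod.snd heq
    omega

lemma nodup_pairsB (M : Int) : (pairsB M).Nodup := by
  rw [pairsB, List.nodup_flatMap]
  constructor
  · intro l hl
    exact (PySem.List.nodup_pyRange_one 0 (M + 1 - l)).map
      (fun a b h => by simpa using congrArg Prod.snd h)
  · have := PySem.List.pairwise_lt_pyRange_one 0 (M + 1)
    refine this.imp ?_
    intro a b hab
    intro p hpa hpb
    simp only [List.mem_map] at hpa hpb
    rcases hpa with ⟨r1, _, rfl⟩
    rcases hpb with ⟨r2, _, heq⟩
    have := congrArg Prod.fst heq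
    simp at this
    omega

lemma pairs_perm (M : Int) : (pairsA M).Perm (pairsB M) := by
  rw [List.perm_ext_iff_of_nodup (nodup_pairsA M) (nodup_pairsB M)]
  intro p
  rw [mem_pairsA, mem_pairsB]

-- ===== VERDICT proofs =====
theorem solve_spec : Claim_equal_solve := by
  intro N K V _ hpre
  unfold Spec_solve
  set M := min K N with hM
  have hA : solve N K V = ((pairsA M).map (fun p => cand N K V p.1 p.2)).foldl max 0 := by
    unfold solve
    rw [← hM, pairsA, List.map_flatMap, List.foldl_flatMap]
    apply PySem.List.foldl_congr_mem
    intro ans k hk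
    have hk' := PySem.List.mem_pyRange_one.mp hk
    rw [List.map_map, List.foldl_map]
    apply PySem.List.foldl_congr_mem
    intro a l hl
    have hl' := PySem.List.mem_pyRange_one.mp hl
    exact body_eq_A N K V k l a hk'.1 (by omega) hl'.1 (by omega)
      (fun hkK' => hpre k hk hkK' l hl)
  have hB : solve_alt N K V = ((pairsB M).map (fun p => cand N K V p.1 p.2)).foldl max 0 := by
    unfold solve_alt
    rw [← hM, pairsB, List.map_flatMap, List.foldl_flatMap]
    simp only [List.map_map]
    apply PySem.List.foldl_congr_mem
    intro ans l hl
    have hl' := PySem.List.mem_pyRange_one.mp hl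
    rw [List.foldl_map]
    apply PySem.List.foldl_congr_mem
    intro a r hr
    have hr' := PySem.List.mem_pyRange_one.mp hr
    exact body_eq_B N K V M l r a hM hl'.1 hr'.1 (by omega)
  rw [hA, hB]
  exact ((pairs_perm M).map _).foldl_eq 0
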